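-- pv_equiv track=rewrite | github.com/saigiresh2278/daa | DAA LAB DAY 11/universal strings.py | universal_strings
-- ===== SOURCE A (Python) =====
-- from collections import Counter
--
-- def universal_strings(words1, words2):
--     # Calculate the maximum frequency of each character needed from words2
--     max_freq = Counter()
--     for word in words2:
--         word_freq = Counter(word)
--         for char, freq in word_freq.items():
--             max_freq[char] = max(max_freq[char], freq)
--
--     # Check each word in words1 to see if it meets the requirement
--     result = []
--     for word in words1:
--         word_freq = Counter(word)
--         if all(word_freq[char] >= freq for char, freq in max_freq.items()):
--             result.append(word)
--
--     return result
-- ===== SOURCE B (Python) =====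
-- from collections import Counter
--
-- def universal_strings(words1, words2):
--     # Per-word counters for words2; no merged max-frequency table is built.
--     w2counters = [Counter(w) for w in words2]
--     result = []
--     for word in words1:
--         wc = Counter(word)
--         if all(wc[c] >= n for w2c in w2counters for c, n in w2c.items()):
--             result.append(word)
--     return result
-- ===== Notes on version B (the rewrite author's own statement) =====
-- stated objective: alternative
-- what changed: B drops A's merged max-frequency table: it precomputes one Counter per words2 word and checks each words1 word directly against every words2 counter.
import Mathlib
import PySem

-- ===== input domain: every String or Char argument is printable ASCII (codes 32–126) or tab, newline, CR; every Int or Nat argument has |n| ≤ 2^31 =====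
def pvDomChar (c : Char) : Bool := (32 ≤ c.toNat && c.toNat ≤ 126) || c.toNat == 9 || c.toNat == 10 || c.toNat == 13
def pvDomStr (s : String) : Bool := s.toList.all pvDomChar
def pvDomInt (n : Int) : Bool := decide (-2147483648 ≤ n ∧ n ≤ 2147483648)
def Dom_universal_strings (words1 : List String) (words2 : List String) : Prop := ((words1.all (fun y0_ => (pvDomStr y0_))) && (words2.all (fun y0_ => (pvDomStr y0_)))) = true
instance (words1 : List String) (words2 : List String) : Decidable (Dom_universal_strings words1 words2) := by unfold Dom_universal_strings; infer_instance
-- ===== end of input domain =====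

-- B replaces A's merged max-frequency table by a direct check of each words1 word
-- against the per-word counters of words2 (objective: alternative decomposition).

-- ===== PORT A =====
-- A's first loop: fold the max of each character frequency of words2 into one dict
def buildMaxFreq (words2 : List String) : PySem.Dict Char Int :=
  words2.foldl
    (fun max_freq word =>
      (PySem.Dict.counter word.toList).items.foldl
        (fun mf p => mf.insert p.1 (max (mf.getD p.1 0) p.2)) max_freq)
    PySem.Dict.empty

def universal_strings (words1 : List String) (words2 : List String) : List String :=
  let max_freq := buildMaxFreq words2
  words1.foldl
    (fun result word =>
      if max_freq.items.all
          (fun p => decide ((PySem.Dict.counter word.toList).getD p.1 0 ≥ p.2))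
      then result ++ [word] else result)
    []

-- ===== PORT B =====
def universal_strings_alt (words1 : List String) (words2 : List String) : List String :=
  let w2counters := words2.map (fun w => PySem.Dict.counter w.toList)
  words1.foldl
    (fun result word =>
      let wc := PySem.Dict.counter word.toList
      if w2counters.all
          (fun w2c => w2c.items.all (fun p => decide (wc.getD p.1 0 ≥ p.2)))
      then result ++ [word] else result)
    []

-- ===== PRECONDITION & SPEC =====
def Spec_universal_strings (words1 : List String) (words2 : List String) (out : List String) : Prop := out = universal_strings_alt words1 words2
instance (words1 : List String) (words2 : List String) (out : List String) : Decidable (Spec_universal_strings words1 words2 out) := by unfold Spec_universal_strings; infer_instance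

-- ===== CLAIM (what is proved, stated in full; the proofs are below) =====
def Claim_equal_universal_strings : Prop := ∀ (words1 : List String) (words2 : List String), Dom_universal_strings words1 words2 → Spec_universal_strings words1 words2 (universal_strings words1 words2)

-- ===== LEMMAS AND PROOFS =====

-- the per-character value A's inner insert loop leaves in the dict
theorem getD_foldl_insert_max {ps : List (Char × Int)} (mf : PySem.Dict Char Int) (c : Char) :
    (ps.foldl (fun d p => d.insert p.1 (max (d.getD p.1 0) p.2)) mf).getD c 0
      = ps.foldl (fun v p => if c = p.1 then max v p.2 else v) (mf.getD c 0) := by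
  induction ps generalizing mf with
  | nil => rfl
  | cons p ps ih =>
      simp only [List.foldl_cons, ih, PySem.Dict.getD_insert]
      by_cases h : c = p.1 <;> simp [h]

theorem foldl_max_of_not_mem {l : List Char} {c : Char} (h : c ∉ l)
    (cnt : Char → Int) (v : Int) :
    l.foldl (fun v k => if c = k then max v (cnt k) else v) v = v := by
  induction l generalizing v with
  | nil => rfl
  | cons k l ih =>
      simp only [List.mem_cons, not_or] at h
      simp [h.1, ih h.2]

theorem foldl_max_of_nodup {l : List Char} (hl : l.Nodup) (c : Char)
    (cnt : Char → Int) (v : Int) :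
    l.foldl (fun v k => if c = k then max v (cnt k) else v) v
      = if c ∈ l then max v (cnt c) else v := by
  induction l generalizing v with
  | nil => rfl
  | cons k l ih =>
      rcases List.nodup_cons.mp hl with ⟨hk, hl'⟩
      by_cases h : c = k
      · subst h
        simp [foldl_max_of_not_mem hk cnt]
      · simp [h, ih hl']

-- getD of A's merged table: fold of per-word maxima
theorem getD_build_aux (ws : List String) (mf : PySem.Dict Char Int) (c : Char) :
    (ws.foldl
      (fun max_freq word =>
        (PySem.Dict.counter word.toList).items.foldl
          (fun d p => d.insert p.1 (max (d.getD p.1 0) p.2)) max_freq)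
      mf).getD c 0
      = ws.foldl
          (fun v w => if c ∈ w.toList then max v ((w.toList.count c : Int)) else v)
          (mf.getD c 0) := by
  induction ws generalizing mf with
  | nil => rfl
  | cons w ws ih =>
      rw [List.foldl_cons, List.foldl_cons, ih]
      congr 1
      rw [getD_foldl_insert_max, PySem.Dict.items_counter]
      simp only [List.foldl_map]
      rw [foldl_max_of_nodup (PySem.Set.nodup_ofList w.toList) c _ _]
      simp [PySem.Set.mem_ofList]

theorem getD_buildMaxFreq (words2 : List String) (c : Char) :
    (buildMaxFreq words2).getD c 0
      = words2.foldl
          (fun v w => if c ∈ w.toList then max v ((w.toList.count c : Int)) else v) 0 := by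
  unfold buildMaxFreq
  rw [getD_build_aux, PySem.Dict.getD_empty]

-- a nonnegative x dominates the fold of maxima iff it dominates every count
theorem ge_foldl_max_iff {x : Int} (hx : 0 ≤ x) (c : Char) (ws : List String) :
    (x ≥ ws.foldl
        (fun v w => if c ∈ w.toList then max v ((w.toList.count c : Int)) else v) 0)
      ↔ ∀ w ∈ ws, x ≥ (w.toList.count c : Int) := by
  have key : ∀ (l : List String) (v : Int),
      (x ≥ l.foldl
          (fun v w => if c ∈ w.toList then max v ((w.toList.count c : Int)) else v) v)
        ↔ (x ≥ v ∧ ∀ w ∈ l, x ≥ (w.toList.count c : Int)) := by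
    intro l
    induction l with
    | nil => intro v; simp
    | cons w l ih =>
        intro v
        simp only [List.foldl_cons, ih, List.mem_cons]
        by_cases h : c ∈ w.toList
        · simp only [h, if_true, ge_iff_le, max_le_iff]
          constructor
          · rintro ⟨⟨hv, hc⟩, hrest⟩
            exact ⟨hv, fun w' hw' => hw'.elim (fun e => e ▸ hc) (hrest w')⟩
          · rintro ⟨hv, hall⟩
            exact ⟨⟨hv, hall w (Or.inl rfl)⟩, fun w' hw' => hall w' (Or.inr hw')⟩
        · have hcnt : w.toList.count c = 0 := List.count_eq_zero.mpr h
          simp only [h, if_false]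
          constructor
          · rintro ⟨hv, hrest⟩
            refine ⟨hv, fun w' hw' => hw'.elim (fun e => ?_) (hrest w')⟩
            subst e; simp [hcnt]; omega
          · rintro ⟨hv, hall⟩
            exact ⟨hv, fun w' hw' => hall w' (Or.inr hw')⟩
  rw [key ws 0]
  simp [hx]

-- items.all over a nodup-keyed dict is a pointwise getD condition (counts are ≥ 0)
theorem items_all_ge_iff (d : PySem.Dict Char Int) (hnd : d.keys.Nodup) (wc : List Char) :
    (∀ p ∈ d.items, decide ((PySem.Dict.counter wc).getD p.1 0 ≥ p.2) = true)
      ↔ ∀ c : Char, ((wc.count c : Int)) ≥ d.getD c 0 := by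
  rw [PySem.Dict.items_eq_map_keys d hnd 0]
  constructor
  · intro h c
    by_cases hc : c ∈ d.keys
    · have := h (c, d.getD c 0) (List.mem_map.mpr ⟨c, hc, rfl⟩)
      simpa [PySem.Dict.getD_counter] using this
    · have hcf : d.contains c = false := by
        rw [← Bool.not_eq_true]
        simpa [PySem.Dict.contains_iff_mem_keys] using hc
      rw [PySem.Dict.getD_of_not_contains d 0 hcf]
      positivity
  · intro h p hp
    obtain ⟨k, hk, rfl⟩ := List.mem_map.mp hp
    simpa [PySem.Dict.getD_counter] using h k

theorem nodup_keys_buildMaxFreq (words2 : List String) :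
    (buildMaxFreq words2).keys.Nodup := by
  unfold buildMaxFreq
  have : ∀ (l : List String) (d : PySem.Dict Char Int), d.keys.Nodup →
      (l.foldl (fun max_freq word =>
        (PySem.Dict.counter word.toList).items.foldl
          (fun mf p => mf.insert p.1 (max (mf.getD p.1 0) p.2)) max_freq) d).keys.Nodup := by
    intro l
    induction l with
    | nil => intro d hd; exact hd
    | cons w l ih =>
        intro d hd
        exact ih _ (PySem.Dict.nodup_keys_foldl_insert_key _ Prod.fst _ d hd)
  exact this words2 _ PySem.Dict.nodup_keys_empty

-- the per-word acceptance tests of A and B coincide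
theorem cond_eq (wc : List Char) (words2 : List String) :
    ((buildMaxFreq words2).items.all
        (fun p => decide ((PySem.Dict.counter wc).getD p.1 0 ≥ p.2)))
      = (words2.map (fun w => PySem.Dict.counter w.toList)).all
          (fun w2c => w2c.items.all
            (fun p => decide ((PySem.Dict.counter wc).getD p.1 0 ≥ p.2))) := by
  rw [Bool.eq_iff_iff]
  simp only [List.all_map, List.all_eq_true, Function.comp_apply]
  rw [items_all_ge_iff _ (nodup_keys_buildMaxFreq words2) wc]
  constructor
  · intro h w hw
    rw [items_all_ge_iff _ (PySem.Dict.nodup_keys_counter _) wc]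
    intro c
    rw [PySem.Dict.getD_counter]
    have hc := h c
    rw [getD_buildMaxFreq] at hc
    exact (ge_foldl_max_iff (by positivity) c words2).mp hc w hw
  · intro h c
    rw [getD_buildMaxFreq]
    refine (ge_foldl_max_iff (by positivity) c words2).mpr ?_
    intro w hw
    have h2 := (items_all_ge_iff _ (PySem.Dict.nodup_keys_counter _) wc).mp (h w hw) c
    rwa [PySem.Dict.getD_counter] at h2

-- ===== VERDICT (by name: the statement is the Claim_ definition above) =====
theorem universal_strings_spec : Claim_equal_universal_strings := by
  intro words1 words2 _
  unfold Spec_universal_strings universal_strings universal_strings_alt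
  simp only [cond_eq]
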